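-- pv_equiv track=rewrite | github.com/karmalet-DS/ChineseRealTalk | utils/hsk_vocab.py | format_levels
-- ===== SOURCE A (Python) =====
-- SYSTEMS = ("old", "new", "newest")
--
-- def _parse_tag(tag: str):
--     """'old-3' → ('old', 3). 숫자로 끝나지 않으면 None."""
--     if not isinstance(tag, str) or "-" not in tag:
--         return None
--     prefix, _, num = tag.rpartition("-")
--     if not num.isdigit():
--         return None
--     return prefix, int(num)
--
-- def format_levels(tags) -> str:
--     """
--     태그 리스트를 'old-3 / new-1 / newest-2' 형태로 포맷.
--     어떤 체계에도 속하지 않으면 '—' 반환.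
--     """
--     if not tags:
--         return "—"
--     out = []
--     for sys in SYSTEMS:
--         nums = [p[1] for t in tags if (p := _parse_tag(t)) and p[0] == sys]
--         if nums:
--             out.append(f"{sys}-{min(nums)}")
--     return " / ".join(out) if out else "—"
-- ===== SOURCE B (Python) =====
-- SYSTEMS = ("old", "new", "newest")
--
-- def _parse_tag(tag: str):
--     if not isinstance(tag, str) or "-" not in tag:
--         return None
--     prefix, _, num = tag.rpartition("-")
--     if not num.isdigit():
--         return None
--     return prefix, int(num)
--
-- def format_levels(tags) -> str:
--     if not tags:
--         return "—"
--     mins = {}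
--     for t in tags:
--         p = _parse_tag(t)
--         if p and p[0] in SYSTEMS:
--             mins[p[0]] = min(mins.get(p[0], p[1]), p[1])
--     out = [f"{s}-{mins[s]}" for s in SYSTEMS if s in mins]
--     return " / ".join(out) if out else "—"
-- ===== Notes on version B (the rewrite author's own statement) =====
-- stated objective: alternative
-- what changed: A scans the whole tag list once per system (3 passes, building a list of levels per system and taking min); B makes a single pass over tags, keeping a dict of running minima per system, then emits in SYSTEMS order.
import Mathlib
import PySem

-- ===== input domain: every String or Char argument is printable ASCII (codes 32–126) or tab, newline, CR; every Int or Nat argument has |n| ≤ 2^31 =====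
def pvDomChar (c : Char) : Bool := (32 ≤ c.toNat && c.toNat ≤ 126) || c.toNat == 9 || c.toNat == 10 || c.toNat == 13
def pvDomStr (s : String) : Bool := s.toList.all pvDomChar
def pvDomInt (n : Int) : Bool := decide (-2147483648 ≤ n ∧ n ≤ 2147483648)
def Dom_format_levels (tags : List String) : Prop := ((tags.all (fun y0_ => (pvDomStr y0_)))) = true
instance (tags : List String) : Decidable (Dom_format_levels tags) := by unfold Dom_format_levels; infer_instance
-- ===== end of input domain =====

-- B replaces A's one-scan-per-system structure by a single pass keeping a dict of running minima (alternative decomposition, same result).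

-- ===== PORT A =====
def pvSystems : List String := ["old", "new", "newest"]

-- _parse_tag: '-' membership, rpartition at the LAST '-', isdigit guard, int(num).
-- rpartition is ported by hand (take/drop at rfind's index); int(num) is PySem.Int.ofChars?,
-- exact here because strIsdigit guarantees a nonempty all-digit string (so .getD 0 is never taken).
def pvParseTag (tag : String) : Option (String × Int) :=
  let cs := tag.toList
  if PySem.Chars.isIn ['-'] cs then
    let i := (PySem.Chars.rfind cs ['-']).toNat
    let num := cs.drop (i + 1)
    if PySem.Chars.strIsdigit num then
      some (String.ofList (cs.take i), (PySem.Int.ofChars? num).getD 0)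
    else none
  else none

-- A's inner comprehension: levels of the tags whose parsed prefix is sys
def pvNumsFor (tags : List String) (sys : String) : List Int :=
  tags.filterMap (fun t =>
    match pvParseTag t with
    | some p => if p.1 = sys then some p.2 else none
    | none => none)

def format_levels (tags : List String) : String :=
  if tags = [] then "—"
  else
    let out := pvSystems.foldl (fun out sys =>
      let nums := pvNumsFor tags sys
      match PySem.List.min? nums (fun x => x) with   -- 'if nums: out.append(f"{sys}-{min(nums)}")'
      | some m => out ++ [sys ++ "-" ++ PySem.Int.toStr m]
      | none => out) []
    if out = [] then "—" else PySem.Str.join " / " out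

-- ===== PORT B =====
-- one step of B's single pass: mins[p[0]] = min(mins.get(p[0], p[1]), p[1])
def pvStep (d : PySem.Dict String Int) (t : String) : PySem.Dict String Int :=
  match pvParseTag t with
  | some p => if pvSystems.contains p.1 then d.insert p.1 (min (d.getD p.1 p.2) p.2) else d
  | none => d

def format_levels_alt (tags : List String) : String :=
  if tags = [] then "—"
  else
    let mins := tags.foldl pvStep PySem.Dict.empty
    let out := pvSystems.filterMap (fun s =>   -- [f"{s}-{mins[s]}" for s in SYSTEMS if s in mins]
      match mins.get? s with
      | some m => some (s ++ "-" ++ PySem.Int.toStr m)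
      | none => none)
    if out = [] then "—" else PySem.Str.join " / " out

-- ===== PRECONDITION & SPEC =====
def Spec_format_levels (tags : List String) (out : String) : Prop := out = format_levels_alt tags
instance (tags : List String) (out : String) : Decidable (Spec_format_levels tags out) := by unfold Spec_format_levels; infer_instance

-- ===== CLAIM (what is proved, stated in full; the proofs are below) =====
def Claim_equal_format_levels : Prop := ∀ (tags : List String), Dom_format_levels tags → Spec_format_levels tags (format_levels tags)

-- ===== LEMMAS AND PROOFS =====

-- option-valued min accumulator (proof-only helper)
def pvOptMin : Option Int → Option Int → Option Int
  | none, o => o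
  | some m, none => some m
  | some m, some k => some (min m k)

lemma pvFoldlMin (a b : Int) (l : List Int) :
    List.foldl min (min a b) l = min a (List.foldl min b l) :=
  List.foldl_assoc

-- the dict built by B's pass answers, at each key in SYSTEMS, the min of A's per-system list
lemma pvFold_get? (sys : String) (hs : pvSystems.contains sys = true) :
    ∀ (tags : List String) (d : PySem.Dict String Int),
      (tags.foldl pvStep d).get? sys
        = pvOptMin (d.get? sys) (PySem.List.min? (pvNumsFor tags sys) (fun x => x)) := by
  intro tags
  induction tags with
  | nil =>
      intro d
      simp only [pvNumsFor, List.filterMap_nil, List.foldl_nil, PySem.List.min?]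
      cases d.get? sys <;> simp [pvOptMin]
  | cons t rest ih =>
      intro d
      have hnum : pvNumsFor (t :: rest) sys
          = (match pvParseTag t with
             | some p => if p.1 = sys then some p.2 else none
             | none => none).toList ++ pvNumsFor rest sys := by
        simp [pvNumsFor, List.filterMap_cons]
        cases pvParseTag t with
        | none => simp
        | some p => by_cases hp : p.1 = sys <;> simp [hp]
      rw [List.foldl_cons]
      cases hpt : pvParseTag t with
      | none =>
          have hstep : pvStep d t = d := by simp [pvStep, hpt]
          rw [hstep, ih d]
          simp [hnum, hpt]
      | some p =>
          by_cases hp : p.1 = sys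
          · -- this tag contributes p.2 to sys
            have hstep : pvStep d t = d.insert sys (min (d.getD sys p.2) p.2) := by
              have hmem : sys ∈ pvSystems := by simpa using hs
              simp [pvStep, hpt, hp, hmem]
            have hnum' : pvNumsFor (t :: rest) sys = p.2 :: pvNumsFor rest sys := by
              simp [hnum, hpt, hp]
            rw [hstep, ih, PySem.Dict.get?_insert_self, PySem.Dict.getD_eq_get?_getD, hnum']
            cases hd : d.get? sys with
            | none =>
                cases hrest : pvNumsFor rest sys with
                | nil => simp [PySem.List.min?, pvOptMin]
                | cons a l =>
                    simp only [Option.getD, PySem.List.min?_id_cons, pvOptMin,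
                      List.foldl_cons, min_self]
                    rw [pvFoldlMin]
            | some m =>
                cases hrest : pvNumsFor rest sys with
                | nil => simp [PySem.List.min?, pvOptMin]
                | cons a l =>
                    simp only [Option.getD, PySem.List.min?_id_cons, pvOptMin,
                      List.foldl_cons]
                    rw [pvFoldlMin, min_assoc]
          · -- tag for a different prefix: key sys untouched
            have hns : sys ≠ p.1 := fun h => hp h.symm
            have hstep : (pvStep d t).get? sys = d.get? sys := by
              by_cases hc : pvSystems.contains p.1 = true
              · simp only [pvStep, hpt, hc, if_pos]
                exact PySem.Dict.get?_insert_of_ne _ _ hns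
              · simp only [pvStep, hpt]
                rw [if_neg (by simpa using hc)]
            have ih' := ih (pvStep d t)
            rw [hstep] at ih'
            rw [ih']
            simp [hnum, hpt, hp]

-- at the empty initial dict the accumulator disappears
lemma pvBuild_get? (sys : String) (hs : pvSystems.contains sys = true) (tags : List String) :
    (tags.foldl pvStep PySem.Dict.empty).get? sys
      = PySem.List.min? (pvNumsFor tags sys) (fun x => x) := by
  rw [pvFold_get? sys hs tags PySem.Dict.empty, PySem.Dict.get?_empty]
  cases PySem.List.min? (pvNumsFor tags sys) (fun x => x) <;> rfl

-- ===== VERDICT (by name: the statement is the Claim_ definition above) =====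
theorem format_levels_spec : Claim_equal_format_levels := by
  intro tags _
  unfold Spec_format_levels format_levels format_levels_alt
  by_cases h : tags = []
  · simp [h]
  · simp only [h, if_false]
    simp only [pvSystems, List.foldl_cons, List.foldl_nil, List.filterMap_cons,
      List.filterMap_nil]
    rw [pvBuild_get? "old" (by decide) tags,
        pvBuild_get? "new" (by decide) tags,
        pvBuild_get? "newest" (by decide) tags]
    cases PySem.List.min? (pvNumsFor tags "old") (fun x => x) <;>
      cases PySem.List.min? (pvNumsFor tags "new") (fun x => x) <;>
        cases PySem.List.min? (pvNumsFor tags "newest") (fun x => x) <;> simp
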